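-- pv_equiv track=rewrite | github.com/Willpon4/Advising-Buddy | catalog_utils.py | available_classes
-- ===== SOURCE A (Python) =====
-- def available_classes(schedule, semester, catalog):
--     """Get the available classes for a semester based on the current schedule.
--
--     A course is available for the indicated semester if it is not
--     already present somewhere in the schedule, and all of the
--     prerequisites have been fulfilled in some previous semester.
--
--     Args:
--         schedule (list): The current course schedule.
--         semester (int): The semester for which to find available classes.
--         catalog (dict): The dictionary containing course information.
--
--     Returns:
--         set: A set of available classes for the specified semester.
--
--     """
--     completed_prereq = set()
--     available = set()
--     schedule_total_set = set()
--     new_semester = set()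
--
--     #This is the classes except for the classes in the given semester
--     sub_list = (schedule[0:semester-1])
--     for set_1 in sub_list:
--         new_semester.update(set_1)
--
--     #get the classes into a set
--     for sem_set in new_semester:
--         completed_prereq.add(sem_set)#adds the classes in the schedule into a set
--
--     #Get the available classes into a set
--     for course in catalog:
--         pre_req_set = catalog[course]['prerequisites']
--         for prereq_str in pre_req_set:
--             if prereq_str in completed_prereq:
--                 available.add(course)
--
--     for course in available.copy():
--         if course in new_semester:
--             available.difference_update(new_semester)
--
--
--     return available
-- ===== SOURCE B (Python) =====
-- def available_classes(schedule, semester, catalog):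
--     """Inverted-index version: map each prerequisite to its dependent courses,
--     then union the dependents of every completed course."""
--     prior = set()
--     for courses in schedule[0:semester - 1]:
--         prior.update(courses)
--     dependents = {}
--     for course, info in catalog.items():
--         for prereq in info['prerequisites']:
--             dependents.setdefault(prereq, set()).add(course)
--     unlocked = set()
--     for done in prior:
--         unlocked |= dependents.get(done, set())
--     return {course for course in catalog if course in unlocked and course not in prior}
-- ===== Notes on version B (the rewrite author's own statement) =====
-- stated objective: alternative
-- what changed: B builds an inverted index from each prerequisite to the set of courses listing it, unions the dependents of every completed course to get the unlocked set, and keeps the not-yet-taken unlocked catalog courses by membership tests only, instead of A's scan that tests every prerequisite of every catalog course against the completed set and then conditionally subtracts.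
import Mathlib
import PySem

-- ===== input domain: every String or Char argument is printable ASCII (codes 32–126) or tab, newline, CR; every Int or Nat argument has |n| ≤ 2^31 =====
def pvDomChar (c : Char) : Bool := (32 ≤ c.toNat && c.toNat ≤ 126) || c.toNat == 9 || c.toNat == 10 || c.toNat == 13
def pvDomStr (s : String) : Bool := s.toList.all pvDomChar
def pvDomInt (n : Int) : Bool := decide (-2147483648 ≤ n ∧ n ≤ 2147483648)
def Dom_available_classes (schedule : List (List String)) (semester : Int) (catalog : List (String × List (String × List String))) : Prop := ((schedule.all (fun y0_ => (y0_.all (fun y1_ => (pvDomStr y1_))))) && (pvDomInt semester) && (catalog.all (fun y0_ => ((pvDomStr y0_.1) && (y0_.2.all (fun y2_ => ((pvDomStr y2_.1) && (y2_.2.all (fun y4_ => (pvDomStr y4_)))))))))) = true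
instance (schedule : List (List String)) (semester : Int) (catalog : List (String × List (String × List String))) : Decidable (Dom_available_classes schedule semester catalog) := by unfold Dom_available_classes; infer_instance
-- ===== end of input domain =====

-- B replaces A's forward scan (every catalog course tested prereq-by-prereq against the completed
-- set, then a quirky conditional subtraction) by an inverted prerequisite→dependents index whose
-- entries are unioned over the completed courses (objective: alternative).

-- ===== PORT A =====
def available_classes (schedule : List (List String)) (semester : Int) (catalog : List (String × List (String × List String))) : List String :=
  -- completed_prereq / available / schedule_total_set / new_semester start empty
  -- (schedule_total_set is never used by A)
  let sub_list := PySem.List.slice schedule (some 0) (some (semester - 1))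
  let new_semester : PySem.Set String :=
    sub_list.foldl (fun ns set_1 => PySem.Set.update ns set_1) PySem.Set.empty
  let completed_prereq : PySem.Set String :=
    new_semester.foldl (fun cp sem_set => PySem.Set.add cp sem_set) PySem.Set.empty
  let available : PySem.Set String :=
    catalog.foldl (fun av course =>
      -- catalog[course]['prerequisites']; KeyError (= none) is excluded by Pre_
      let pre_req_set := (((PySem.Dict.mk catalog).get? course.1).map
          (fun d => ((PySem.Dict.mk d).get? "prerequisites").getD [])).getD []
      pre_req_set.foldl (fun av2 prereq_str =>
        if PySem.Set.contains completed_prereq prereq_str then PySem.Set.add av2 course.1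
        else av2) av) PySem.Set.empty
  -- for course in available.copy(): if course in new_semester: available.difference_update(new_semester)
  available.foldl (fun av course =>
    if PySem.Set.contains new_semester course then PySem.Set.diff av new_semester else av) available

-- ===== PORT B =====
def available_classes_alt (schedule : List (List String)) (semester : Int) (catalog : List (String × List (String × List String))) : List String :=
  -- prior = set(); for courses in schedule[0:semester-1]: prior.update(courses)
  let prior : PySem.Set String :=
    (PySem.List.slice schedule (some 0) (some (semester - 1))).foldl
      (fun acc courses => PySem.Set.update acc courses) PySem.Set.empty
  -- dependents = {}; for course, info in catalog.items(): for q in info['prerequisites']: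
  --   dependents.setdefault(q, set()).add(course)   (= dependents[q] = dependents.get(q, set()) | {course})
  let dependents : PySem.Dict String (PySem.Set String) :=
    catalog.foldl (fun d p =>
      ((((PySem.Dict.mk p.2).get? "prerequisites")).getD []).foldl
        (fun d2 q => d2.modify q PySem.Set.empty (fun s => PySem.Set.add s p.1)) d)
      PySem.Dict.empty
  -- unlocked = set(); for done in prior: unlocked |= dependents.get(done, set())
  let unlocked : PySem.Set String :=
    prior.foldl (fun u done => PySem.Set.union u ((dependents.get? done).getD PySem.Set.empty))
      PySem.Set.empty
  -- return {course for course in catalog if course in unlocked and course not in prior}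
  catalog.foldl (fun acc p =>
    if PySem.Set.contains unlocked p.1 && !(PySem.Set.contains prior p.1)
    then PySem.Set.add acc p.1 else acc) PySem.Set.empty

-- ===== PRECONDITION & SPEC =====
-- Pre_ excludes (a) catalogs where some course's dict lacks the key "prerequisites" (Python A
-- raises KeyError there) and (b) association lists with duplicate catalog keys, which no Python
-- dict argument can produce (a Python dict's keys are unique).
def Pre_available_classes (schedule : List (List String)) (semester : Int) (catalog : List (String × List (String × List String))) : Prop :=
  (catalog.map Prod.fst).Nodup ∧
  ∀ p ∈ catalog, ((PySem.Dict.mk p.2).get? "prerequisites").isSome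
instance (schedule : List (List String)) (semester : Int) (catalog : List (String × List (String × List String))) : Decidable (Pre_available_classes schedule semester catalog) := by unfold Pre_available_classes; infer_instance
def pvWitness_available_classes : List (List String) × Int × (List (String × List (String × List String))) :=
  ([["MATH 101"], ["CS 201"]], 2, [("CS 301", [("prerequisites", ["MATH 101"])]), ("CS 101", [("prerequisites", [])])])
def Spec_available_classes (schedule : List (List String)) (semester : Int) (catalog : List (String × List (String × List String))) (out : List String) : Prop := out = available_classes_alt schedule semester catalog
instance (schedule : List (List String)) (semester : Int) (catalog : List (String × List (String × List String))) (out : List String) : Decidable (Spec_available_classes schedule semester catalog out) := by unfold Spec_available_classes; infer_instance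

-- ===== CLAIM (what is proved, stated in full; the proofs are below) =====
def Claim_equal_available_classes : Prop := ∀ (schedule : List (List String)) (semester : Int) (catalog : List (String × List (String × List String))), Dom_available_classes schedule semester catalog → Pre_available_classes schedule semester catalog → Spec_available_classes schedule semester catalog (available_classes schedule semester catalog)

-- ===== LEMMAS AND PROOFS =====

theorem pv_bool_false {b : Bool} (h : ¬ b = true) : b = false := by
  revert h; cases b <;> simp

-- the prior-set accumulator stays duplicate-free
theorem pv_nodup_fold_update (l : List (List String)) (s : PySem.Set String) (h : s.Nodup) :
    (l.foldl (fun ns xs => PySem.Set.update ns xs) s).Nodup := by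
  induction l generalizing s with
  | nil => exact h
  | cons x l ih => exact ih _ (PySem.Set.nodup_update s x h)

-- A's inner loop over the prerequisite list adds the course once iff some prerequisite is completed
theorem pv_inner_fold (P : PySem.Set String) (c : String) (l : List String) (a : PySem.Set String) :
    l.foldl (fun av2 q => if PySem.Set.contains P q then PySem.Set.add av2 c else av2) a
      = if l.any (fun q => PySem.Set.contains P q) then PySem.Set.add a c else a := by
  induction l generalizing a with
  | nil => simp
  | cons q l ih =>
    simp only [List.foldl_cons, List.any_cons]
    by_cases hq : PySem.Set.contains P q = true
    · have hcond : (PySem.Set.contains P q || l.any fun q => PySem.Set.contains P q) = true := by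
        rw [hq, Bool.true_or]
      rw [if_pos hq, ih, if_pos hcond]
      split_ifs with h
      · rw [PySem.Set.add_of_mem ((PySem.Set.mem_add a c c).mpr (Or.inr rfl))]
      · rfl
    · rw [if_neg hq, ih]
      by_cases hl : (l.any fun q => PySem.Set.contains P q) = true
      · have hcond : (PySem.Set.contains P q || l.any fun q => PySem.Set.contains P q) = true := by
          rw [hl, Bool.or_true]
        rw [if_pos hl, if_pos hcond]
      · have hcond : ¬ (PySem.Set.contains P q || l.any fun q => PySem.Set.contains P q) = true := by
          intro hcontra
          rw [pv_bool_false hq, pv_bool_false hl] at hcontra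
          exact Bool.noConfusion hcontra
        rw [if_neg hl, if_neg hcond]

theorem pv_filter_singleton_true (P : PySem.Set String) (c : String)
    (h : PySem.Set.contains P c = true) :
    List.filter (fun x => !PySem.Set.contains P x) [c] = [] := by
  rw [List.filter_singleton, h]
  rfl

theorem pv_filter_singleton_false (P : PySem.Set String) (c : String)
    (h : PySem.Set.contains P c = false) :
    List.filter (fun x => !PySem.Set.contains P x) [c] = [c] := by
  rw [List.filter_singleton, h]
  rfl

-- removing P from a set after adding c
theorem pv_diff_add (P s : PySem.Set String) (c : String) :
    PySem.Set.diff (PySem.Set.add s c) P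
      = if PySem.Set.contains P c then PySem.Set.diff s P
        else PySem.Set.add (PySem.Set.diff s P) c := by
  by_cases hP : PySem.Set.contains P c = true
  · rw [if_pos hP, PySem.Set.add_eq_ite]
    by_cases hs : c ∈ s
    · rw [if_pos hs]
    · rw [if_neg hs]
      unfold PySem.Set.diff
      rw [List.filter_append, pv_filter_singleton_true P c hP, List.append_nil]
  · have hP' : PySem.Set.contains P c = false := pv_bool_false hP
    rw [if_neg hP, PySem.Set.add_eq_ite]
    by_cases hs : c ∈ s
    · rw [if_pos hs]
      have hmem : c ∈ PySem.Set.diff s P := by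
        rw [PySem.Set.mem_diff]
        refine ⟨hs, fun hc => ?_⟩
        rw [(PySem.Set.contains_iff P c).mpr hc] at hP'
        exact Bool.noConfusion hP'
      rw [PySem.Set.add_of_mem hmem]
    · rw [if_neg hs]
      have hnm : c ∉ PySem.Set.diff s P := fun hc => hs ((PySem.Set.mem_diff s P c).mp hc).1
      rw [PySem.Set.add_of_not_mem hnm]
      unfold PySem.Set.diff
      rw [List.filter_append, pv_filter_singleton_false P c hP']

theorem pv_diff_idem (P s : PySem.Set String) :
    PySem.Set.diff (PySem.Set.diff s P) P = PySem.Set.diff s P := by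
  unfold PySem.Set.diff
  rw [List.filter_filter]
  exact List.filter_congr (fun x _ => by cases PySem.Set.contains P x <;> rfl)

theorem pv_diff_eq_self (P s : PySem.Set String)
    (h : ∀ c ∈ s, PySem.Set.contains P c = false) : PySem.Set.diff s P = s := by
  unfold PySem.Set.diff
  rw [List.filter_eq_self]
  intro a ha
  rw [h a ha]
  rfl

-- A's trailing copy/difference_update loop subtracts P as soon as it meets an element of P
theorem pv_final_loop (P : PySem.Set String) (l s : PySem.Set String) :
    l.foldl (fun av c => if PySem.Set.contains P c then PySem.Set.diff av P else av) s
      = if l.any (fun c => PySem.Set.contains P c) then PySem.Set.diff s P else s := by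
  induction l generalizing s with
  | nil => simp
  | cons c l ih =>
    simp only [List.foldl_cons, List.any_cons]
    by_cases hc : PySem.Set.contains P c = true
    · have hcond : (PySem.Set.contains P c || l.any fun c => PySem.Set.contains P c) = true := by
        rw [hc, Bool.true_or]
      rw [if_pos hc, ih, if_pos hcond]
      split_ifs with h
      · rw [pv_diff_idem]
      · rfl
    · rw [if_neg hc, ih]
      by_cases hl : (l.any fun c => PySem.Set.contains P c) = true
      · have hcond : (PySem.Set.contains P c || l.any fun c => PySem.Set.contains P c) = true := by
          rw [hl, Bool.or_true]
        rw [if_pos hl, if_pos hcond]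
      · have hcond : ¬ (PySem.Set.contains P c || l.any fun c => PySem.Set.contains P c) = true := by
          intro hcontra
          rw [pv_bool_false hc, pv_bool_false hl] at hcontra
          exact Bool.noConfusion hcontra
        rw [if_neg hl, if_neg hcond]

-- … so the whole trailing loop is the plain set difference
theorem pv_final (P s : PySem.Set String) :
    s.foldl (fun av c => if PySem.Set.contains P c then PySem.Set.diff av P else av) s
      = PySem.Set.diff s P := by
  rw [pv_final_loop]
  split_ifs with h
  · rfl
  · rw [pv_diff_eq_self]
    intro c hc
    simp only [List.any_eq_true, not_exists] at h
    exact pv_bool_false (fun ht => h c ⟨hc, ht⟩)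

-- pushing the final difference into A's building fold
theorem pv_push_diff (P : PySem.Set String) (cond : (String × List (String × List String)) → Bool)
    (l : List (String × List (String × List String))) (s : PySem.Set String) :
    PySem.Set.diff (l.foldl (fun av p => if cond p then PySem.Set.add av p.1 else av) s) P
      = l.foldl (fun acc p => if !(PySem.Set.contains P p.1) && cond p then PySem.Set.add acc p.1 else acc)
          (PySem.Set.diff s P) := by
  induction l generalizing s with
  | nil => rfl
  | cons p l ih =>
    simp only [List.foldl_cons]
    by_cases hcond : cond p = true
    · rw [if_pos hcond, ih, pv_diff_add]
      by_cases h : PySem.Set.contains P p.1 = true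
      · have hmem : p.1 ∈ P := (PySem.Set.contains_iff P p.1).mp h
        rw [if_pos h, if_neg (by simp [hmem])]
      · have hnm : p.1 ∉ P := fun hc => by
          rw [(PySem.Set.contains_iff P p.1).mpr hc] at h
          exact h rfl
        rw [if_neg h, if_pos (by simp [hnm, hcond])]
    · rw [if_neg hcond, ih, if_neg (by simp [pv_bool_false hcond])]

-- Python's  any(q in prior for q in l)  equals  not prior.isdisjoint(l)
theorem pv_any_comm (P l : List String) :
    l.any (fun q => PySem.Set.contains P q) = !(PySem.Set.isdisjoint P l) := by
  rw [Bool.eq_iff_iff]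
  simp only [PySem.Set.isdisjoint, PySem.Set.contains, Bool.not_not, List.any_eq_true,
    List.contains_iff_mem]
  exact ⟨fun ⟨x, h1, h2⟩ => ⟨x, h2, h1⟩, fun ⟨x, h1, h2⟩ => ⟨x, h2, h1⟩⟩

-- B's inner index loop: membership in the bucket at q after registering course c0 under qs
theorem pv_index_inner (c0 : String) (qs : List String)
    (d : PySem.Dict String (PySem.Set String)) (q c : String) :
    c ∈ (qs.foldl (fun d2 x => d2.modify x PySem.Set.empty (fun s => PySem.Set.add s c0)) d).getD q PySem.Set.empty
      ↔ c ∈ d.getD q PySem.Set.empty ∨ (c = c0 ∧ q ∈ qs) := by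
  induction qs generalizing d with
  | nil => simp
  | cons x qs ih =>
    simp only [List.foldl_cons, List.mem_cons]
    rw [ih]
    rw [PySem.Dict.getD_modify]
    by_cases hqx : q = x
    · subst hqx
      rw [if_pos rfl, PySem.Set.mem_add]
      tauto
    · rw [if_neg hqx]
      tauto

-- B's index build: membership in the bucket at q over the whole catalog
theorem pv_index_mem (l : List (String × List (String × List String)))
    (d : PySem.Dict String (PySem.Set String)) (q c : String) :
    c ∈ (l.foldl (fun d p =>
          ((((PySem.Dict.mk p.2).get? "prerequisites")).getD []).foldl
            (fun d2 x => d2.modify x PySem.Set.empty (fun s => PySem.Set.add s p.1)) d) d).getD q PySem.Set.empty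
      ↔ c ∈ d.getD q PySem.Set.empty
        ∨ ∃ p ∈ l, p.1 = c ∧ q ∈ (((PySem.Dict.mk p.2).get? "prerequisites")).getD [] := by
  induction l generalizing d with
  | nil => simp
  | cons p l ih =>
    simp only [List.foldl_cons, List.mem_cons]
    rw [ih, pv_index_inner]
    constructor
    · rintro (((h | ⟨rfl, hq⟩) | ⟨p', hp', h1, h2⟩))
      · exact Or.inl h
      · exact Or.inr ⟨p, Or.inl rfl, rfl, hq⟩
      · exact Or.inr ⟨p', Or.inr hp', h1, h2⟩
    · rintro (h | ⟨p', (rfl | hp'), h1, h2⟩)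
      · exact Or.inl (Or.inl h)
      · exact Or.inl (Or.inr ⟨h1.symm, h2⟩)
      · exact Or.inr ⟨p', hp', h1, h2⟩

-- B's union loop over the completed courses
theorem pv_union_fold_mem (g : String → PySem.Set String) (l u : List String) (c : String) :
    c ∈ l.foldl (fun u done => PySem.Set.union u (g done)) u
      ↔ c ∈ u ∨ ∃ done ∈ l, c ∈ g done := by
  induction l generalizing u with
  | nil => simp
  | cons x l ih =>
    simp only [List.foldl_cons, List.mem_cons]
    rw [ih, PySem.Set.mem_union]
    constructor
    · rintro ((h | h) | ⟨d, hd, hc⟩)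
      · exact Or.inl h
      · exact Or.inr ⟨x, Or.inl rfl, h⟩
      · exact Or.inr ⟨d, Or.inr hd, hc⟩
    · rintro (h | ⟨d, (rfl | hd), hc⟩)
      · exact Or.inl (Or.inl h)
      · exact Or.inl (Or.inr hc)
      · exact Or.inr ⟨d, hd, hc⟩

-- ===== VERDICT (by name: the statement is the Claim_ definition above) =====
theorem available_classes_spec : Claim_equal_available_classes := by
  intro schedule semester catalog _hdom hpre
  obtain ⟨hnodup, _hkeys⟩ := hpre
  unfold Spec_available_classes
  simp only [available_classes, available_classes_alt]
  set P : PySem.Set String :=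
    (PySem.List.slice schedule (some 0) (some (semester - 1))).foldl
      (fun ns set_1 => PySem.Set.update ns set_1) PySem.Set.empty with hPdef
  have hPnodup : P.Nodup := pv_nodup_fold_update _ _ List.nodup_nil
  -- completed_prereq re-collects new_semester element by element: it IS new_semester
  have hcompleted : P.foldl (fun cp sem_set => PySem.Set.add cp sem_set) PySem.Set.empty = P := by
    have h1 : P.foldl (fun cp sem_set => PySem.Set.add cp sem_set) PySem.Set.empty
        = PySem.Set.ofList P := by
      rw [PySem.Set.ofList_eq_foldl]
      rfl
    rw [h1, PySem.Set.ofList_eq_self_of_nodup P hPnodup]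
  rw [hcompleted]
  -- rewrite A's catalog loop body into single-add form (valid on catalog entries)
  have hbody : ∀ (av : PySem.Set String) (p : String × List (String × List String)), p ∈ catalog →
      ((((PySem.Dict.mk catalog).get? p.1).map
          (fun d => ((PySem.Dict.mk d).get? "prerequisites").getD [])).getD []).foldl
        (fun av2 prereq_str =>
          if PySem.Set.contains P prereq_str then PySem.Set.add av2 p.1 else av2) av
      = if !(PySem.Set.isdisjoint P (((PySem.Dict.mk p.2).get? "prerequisites").getD []))
        then PySem.Set.add av p.1 else av := by
    intro av p hp
    have hget : (PySem.Dict.mk catalog).get? p.1 = some p.2 := by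
      apply PySem.Dict.get?_of_mem_items
      · simpa [PySem.Dict.items] using hp
      · simpa [PySem.Dict.keys, PySem.Dict.items] using hnodup
    simp only [hget, Option.map_some, Option.getD_some]
    rw [pv_inner_fold, pv_any_comm]
  rw [PySem.List.foldl_congr_mem _ _ _ _ hbody, pv_final,
    pv_push_diff P (fun p => !(PySem.Set.isdisjoint P (((PySem.Dict.mk p.2).get? "prerequisites").getD [])))]
  have hdiff_empty : PySem.Set.diff PySem.Set.empty P = PySem.Set.empty := rfl
  rw [hdiff_empty]
  -- both sides are now folds over catalog from the empty set; show the bodies agree on catalog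
  apply PySem.List.foldl_congr_mem
  intro acc p hp
  -- B's unlocked set contains p.1 iff some prerequisite of p is completed
  have hunlocked :
      PySem.Set.contains
        (P.foldl (fun u done => PySem.Set.union u
            (((catalog.foldl (fun d p =>
                (((PySem.Dict.mk p.2).get? "prerequisites").getD []).foldl
                  (fun d2 q => d2.modify q PySem.Set.empty (fun s => PySem.Set.add s p.1)) d)
              PySem.Dict.empty).get? done).getD PySem.Set.empty))
          PySem.Set.empty) p.1
      = !(PySem.Set.isdisjoint P (((PySem.Dict.mk p.2).get? "prerequisites").getD [])) := by
    rw [Bool.eq_iff_iff, PySem.Set.contains_iff, pv_union_fold_mem, ← pv_any_comm]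
    simp only [List.any_eq_true, PySem.Set.contains_iff, PySem.Set.empty, List.not_mem_nil, false_or]
    constructor
    · rintro ⟨done, hdone, hc⟩
      rw [← PySem.Dict.getD_eq_get?_getD] at hc
      rcases (pv_index_mem catalog PySem.Dict.empty done p.1).mp hc with h | ⟨p', hp', h1, h2⟩
      · simp [PySem.Dict.getD_empty] at h
      · have hppe : p' = p := List.inj_on_of_nodup_map hnodup hp' hp h1
        subst hppe
        exact ⟨done, h2, hdone⟩
    · rintro ⟨q, hq, hqP⟩
      refine ⟨q, hqP, ?_⟩
      rw [← PySem.Dict.getD_eq_get?_getD]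
      exact (pv_index_mem catalog PySem.Dict.empty q p.1).mpr (Or.inr ⟨p, hp, rfl, hq⟩)
  rw [hunlocked, Bool.and_comm]
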